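-- pv_equiv track=rewrite | github.com/charlesdedampierre/BunkaTopics | bunkatopics/topic_modeling/topic_model_builder.py | clean_terms
-- ===== SOURCE A (Python) =====
-- import typing as t
--
-- def clean_terms(terms: t.List[str]) -> t.List[str]:
--     """
--     Remove overlapping terms from a list of terms.
--
--     Args:
--         terms (List[str]): List of terms to process.
--
--     Returns:
--         List[str]: List of terms with overlapping terms removed.
--     """
--     seen_words = set()
--     filtered_terms = []
--
--     for term in terms:
--         # Remove leading and trailing spaces and convert to lowercase
--         cleaned_term = term.strip()
--
--         # Skip the term 'CUR'
--         if cleaned_term == "CUR":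
--             continue
--
--         # Skip terms with one letter or number or with only alpha-numeric sign
--         if (
--             len(cleaned_term) <= 1
--             or cleaned_term.isnumeric()
--             or not cleaned_term.isalpha()
--         ):
--             continue
--
--         # Check if the cleaned term consists of only alphabetical characters
--         if all(char.isalpha() for char in cleaned_term):
--             # Check if the cleaned term is in the seen_words set
--             if cleaned_term not in seen_words:
--                 filtered_terms.append(cleaned_term)
--                 seen_words.add(cleaned_term)
--
--     # Create a dictionary to store terms with lowercase keys
--     term_dict = {}
--
--     for term in filtered_terms:
--         # Convert the term to lowercase to use as the key
--         lowercase_term = term.lower()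
--
--         # Check if the lowercase term is not already in the dictionary
--         # If it's not in the dictionary or if the original term is uppercase, add it
--         if lowercase_term not in term_dict or term.isupper():
--             term_dict[lowercase_term] = term
--
--     # Extract the unique terms (case-insensitive) from the dictionary values
--     result = list(term_dict.values())
--
--     return result
-- ===== SOURCE B (Python) =====
-- import typing as t
--
-- def clean_terms(terms: t.List[str]) -> t.List[str]:
--     """One-pass variant: dedup straight into the case-insensitive dict."""
--     term_dict = {}
--     for term in terms:
--         cleaned = term.strip()
--         if cleaned == "CUR":
--             continue
--         if len(cleaned) <= 1 or cleaned.isnumeric() or not cleaned.isalpha():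
--             continue
--         key = cleaned.lower()
--         if key not in term_dict or cleaned.isupper():
--             term_dict[key] = cleaned
--     return list(term_dict.values())
-- ===== Notes on version B (the rewrite author's own statement) =====
-- stated objective: simpler
-- what changed: Fused A's two passes (set-based exact dedup into an intermediate list, then a dict pass) into a single pass that inserts each cleaned term straight into the case-insensitive dict, dropping the seen_words set, the filtered_terms list and the redundant all(isalpha) check.
import Mathlib
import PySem

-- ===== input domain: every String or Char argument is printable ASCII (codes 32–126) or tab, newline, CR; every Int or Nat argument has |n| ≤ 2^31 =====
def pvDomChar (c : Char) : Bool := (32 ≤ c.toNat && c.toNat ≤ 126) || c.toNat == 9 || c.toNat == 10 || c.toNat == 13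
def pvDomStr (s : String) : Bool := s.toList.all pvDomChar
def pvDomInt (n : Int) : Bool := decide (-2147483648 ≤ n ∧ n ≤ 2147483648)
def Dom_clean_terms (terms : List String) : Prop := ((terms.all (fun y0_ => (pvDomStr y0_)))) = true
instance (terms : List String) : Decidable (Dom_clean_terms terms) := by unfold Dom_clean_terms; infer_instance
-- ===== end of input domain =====

-- B fuses A's two passes into one pass over a single dict (simpler decomposition, same result).

-- ===== PORT A =====
-- Python str.isupper(): at least one cased char and no lowercase cased char (exact on ASCII,
-- where the cased chars are exactly the letters).
def pvStrIsupper (cs : List Char) : Bool :=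
  cs.any (fun c => PySem.Chars.islower c || PySem.Chars.isupper c) &&
  cs.all (fun c => !PySem.Chars.islower c)

-- body of A's first loop: the (seen_words, filtered_terms) accumulator
def pvStep1 (st : PySem.Set String × List String) (term : String) :
    PySem.Set String × List String :=
  let cleaned := PySem.Str.strip term
  if cleaned == "CUR" then st
  else if decide (PySem.Str.len cleaned ≤ 1) || PySem.Str.strIsdigit cleaned
          || !PySem.Str.strIsalpha cleaned then st
  else if cleaned.toList.all PySem.Chars.isalpha then
    if !(PySem.Set.contains st.1 cleaned) then
      (PySem.Set.add st.1 cleaned, st.2 ++ [cleaned])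
    else st
  else st

-- body of A's second loop: the case-insensitive dict
def pvStep2 (d : PySem.Dict String String) (term : String) : PySem.Dict String String :=
  let lowercase_term := PySem.Str.lower term
  if !(d.contains lowercase_term) || pvStrIsupper term.toList then
    d.insert lowercase_term term
  else d

-- cleaned_term.isnumeric() is ported as strIsdigit: on ASCII strings isnumeric and isdigit coincide.
def clean_terms (terms : List String) : List String :=
  let st := terms.foldl pvStep1 (PySem.Set.empty, [])
  let term_dict := st.2.foldl pvStep2 PySem.Dict.empty
  term_dict.values

-- ===== PORT B =====
-- body of B's single loop (same guards, then straight into the case-insensitive dict)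
def pvAltStep (d : PySem.Dict String String) (term : String) : PySem.Dict String String :=
  let cleaned := PySem.Str.strip term
  if cleaned == "CUR" then d
  else if decide (PySem.Str.len cleaned ≤ 1) || PySem.Str.strIsdigit cleaned
          || !PySem.Str.strIsalpha cleaned then d
  else
    let key := PySem.Str.lower cleaned
    if !(d.contains key) || pvStrIsupper cleaned.toList then d.insert key cleaned
    else d

def clean_terms_alt (terms : List String) : List String :=
  (terms.foldl pvAltStep PySem.Dict.empty).values

-- ===== PRECONDITION & SPEC =====
def Spec_clean_terms (terms : List String) (out : List String) : Prop := out = clean_terms_alt terms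
instance (terms : List String) (out : List String) : Decidable (Spec_clean_terms terms out) := by unfold Spec_clean_terms; infer_instance

-- ===== CLAIM (what is proved, stated in full; the proofs are below) =====
def Claim_equal_clean_terms : Prop := ∀ (terms : List String), Dom_clean_terms terms → Spec_clean_terms terms (clean_terms terms)

-- ===== LEMMAS AND PROOFS =====

lemma lowerChar_inj (a b : Char) (ha : PySem.Chars.isupper a = true)
    (hb : PySem.Chars.isupper b = true)
    (h : PySem.Chars.lowerChar a = PySem.Chars.lowerChar b) : a = b := by
  have hA : a.toNat ≤ 90 := by
    simp [PySem.Chars.isupper] at ha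
    exact UInt32.le_iff_toNat_le.mp (Char.le_def.mp ha.2)
  have hB : b.toNat ≤ 90 := by
    simp [PySem.Chars.isupper] at hb
    exact UInt32.le_iff_toNat_le.mp (Char.le_def.mp hb.2)
  rw [PySem.Chars.lowerChar, PySem.Chars.lowerChar, if_pos ha, if_pos hb] at h
  have h2 := congrArg Char.toNat h
  rw [Char.toNat_ofNat, Char.toNat_ofNat, if_pos (Or.inl (by omega)), if_pos (Or.inl (by omega))] at h2
  have h3 : a.toNat = b.toNat := by omega
  exact Char.ext (UInt32.toNat_inj.mp h3)

def pvKeep (c : String) : Bool :=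
  !(c == "CUR") &&
  !(decide (PySem.Str.len c ≤ 1) || PySem.Str.strIsdigit c || !PySem.Str.strIsalpha c)

lemma keep_alpha {c : String} (h : pvKeep c = true) : PySem.Str.strIsalpha c = true := by
  simp [pvKeep] at h
  simpa using h.2.2

lemma alpha_all {c : String} (h : PySem.Str.strIsalpha c = true) :
    c.toList.all PySem.Chars.isalpha = true := by
  simp [PySem.Str.strIsalpha_eq, PySem.Chars.strIsalpha] at h
  simp [List.all_eq_true]
  exact fun a ha => h.2 a ha

lemma chars_upper_unique : ∀ (a b : List Char),
    a.all PySem.Chars.isalpha = true → b.all PySem.Chars.isalpha = true →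
    a.all (fun c => !PySem.Chars.islower c) = true →
    b.all (fun c => !PySem.Chars.islower c) = true →
    PySem.Chars.lower a = PySem.Chars.lower b → a = b
  | [], b, _, _, _, _, h => by
    simp [PySem.Chars.lower] at h; exact h.symm
  | x :: xs, [], _, _, _, _, h => by simp [PySem.Chars.lower] at h
  | x :: xs, y :: ys, ha, hb, hua, hub, h => by
    simp only [PySem.Chars.lower, List.map_cons, List.cons.injEq] at h
    simp only [List.all_cons, Bool.and_eq_true] at ha hb hua hub
    have hx : PySem.Chars.isupper x = true := by
      have := ha.1; simp [PySem.Chars.isalpha] at this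
      rcases this with h' | h'
      · exact h'
      · exact absurd h' (by simpa using hua.1)
    have hy : PySem.Chars.isupper y = true := by
      have := hb.1; simp [PySem.Chars.isalpha] at this
      rcases this with h' | h'
      · exact h'
      · exact absurd h' (by simpa using hub.1)
    have := lowerChar_inj x y hx hy h.1
    rw [this, chars_upper_unique xs ys ha.2 hb.2 hua.2 hub.2 h.2]

lemma upper_unique {u v : String} (hu : PySem.Str.strIsalpha u = true)
    (hv : PySem.Str.strIsalpha v = true) (huu : pvStrIsupper u.toList = true)
    (hvu : pvStrIsupper v.toList = true) (h : PySem.Str.lower u = PySem.Str.lower v) :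
    u = v := by
  have h' : PySem.Chars.lower u.toList = PySem.Chars.lower v.toList := by
    have := congrArg String.toList h
    simpa [PySem.Str.lower] using this
  apply String.toList_inj.mp
  exact chars_upper_unique _ _ (alpha_all hu) (alpha_all hv)
    ((Bool.and_eq_true _ _).mp huu).2 ((Bool.and_eq_true _ _).mp hvu).2 h'

lemma map_keep_of_no_key (k : String) (v : String) :
    ∀ l : List (String × String), (∀ r ∈ l, r.1 ≠ k) →
      l.map (fun p => if (p.1 == k) = true then (k, v) else p) = l := by
  intro l hl
  apply List.map_congr_left ?_ |>.trans l.map_id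
  intro p hp
  simp [hl p hp]

lemma find?_items (k v : String) (items : List (String × String))
    (h : Option.map (fun x => x.2) (items.find? (fun p => p.1 == k)) = some v) :
    items.find? (fun p => p.1 == k) = some (k, v) := by
  obtain ⟨p, hp, hv⟩ : ∃ p, items.find? (fun p => p.1 == k) = some p ∧ p.2 = v := by
    cases hf : items.find? (fun p => p.1 == k) with
    | none => simp [hf] at h
    | some p => simp [hf] at h; exact ⟨p, rfl, h⟩
  have := List.find?_some hp
  simp at this
  rw [hp]
  cases p
  simp_all

lemma items_map_eq (k v : String) : ∀ (items : List (String × String)),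
    (items.map Prod.fst).Nodup →
    items.find? (fun p => p.1 == k) = some (k, v) →
    items.map (fun p => if (p.1 == k) = true then (k, v) else p) = items
  | [], _, h => by simp at h
  | q :: rest, hnd, h => by
    simp only [List.map_cons, List.nodup_cons] at hnd
    by_cases hq : (q.1 == k) = true
    · have hqk : q.1 = k := by simpa using hq
      rw [List.find?_cons_of_pos (p := fun p => p.1 == k) (l := rest) hq] at h
      have : q = (k, v) := by injection h
      simp only [List.map_cons, hq, if_pos]
      rw [this, map_keep_of_no_key k v rest (fun r hr => by
        intro hrk
        have hm : r.1 ∈ rest.map Prod.fst := List.mem_map_of_mem hr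
        rw [hrk, ← hqk] at hm
        exact hnd.1 hm)]
    · rw [List.find?_cons_of_neg (p := fun p => p.1 == k) (l := rest) (by simp [hq])] at h
      simp only [List.map_cons, hq, if_neg, Bool.false_eq_true, not_false_iff]
      rw [items_map_eq k v rest hnd.2 h]

lemma insert_self_of_get? (d : PySem.Dict String String) (k v : String)
    (hnd : d.keys.Nodup) (h : d.get? k = some v) : d.insert k v = d := by
  have hc : d.contains k = true := by
    rw [PySem.Dict.contains_eq_isSome_get?, h]; rfl
  obtain ⟨items⟩ := d
  simp only [PySem.Dict.insert, hc, if_pos, PySem.Dict.mk.injEq]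
  exact items_map_eq k v items (by simpa [PySem.Dict.keys] using hnd)
    (find?_items k v items (by simpa [PySem.Dict.get?] using h))

def pvInv (seen : PySem.Set String) (d : PySem.Dict String String) : Prop :=
  d.keys.Nodup ∧
  ∀ u ∈ seen, PySem.Str.strIsalpha u = true ∧
    d.contains (PySem.Str.lower u) = true ∧
    (pvStrIsupper u.toList = true → d.get? (PySem.Str.lower u) = some u)

lemma step2_noop {seen : PySem.Set String} {d : PySem.Dict String String} {c : String}
    (hinv : pvInv seen d) (hc : c ∈ seen) : pvStep2 d c = d := by
  obtain ⟨hnd, hs⟩ := hinv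
  obtain ⟨ha, hcont, hup⟩ := hs c hc
  simp only [pvStep2]
  simp only [hcont, Bool.not_true, Bool.false_or]
  by_cases hu : pvStrIsupper c.toList = true
  · rw [if_pos hu]
    exact insert_self_of_get? d _ c hnd (hup hu)
  · rw [if_neg (by simpa using hu)]

lemma inv_step {seen : PySem.Set String} {d : PySem.Dict String String} {c : String}
    (hinv : pvInv seen d) (hk : pvKeep c = true) :
    pvInv (PySem.Set.add seen c) (pvStep2 d c) := by
  obtain ⟨hnd, hs⟩ := hinv
  have hca : PySem.Str.strIsalpha c = true := keep_alpha hk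
  constructor
  · simp only [pvStep2]
    split
    · exact PySem.Dict.nodup_keys_insert d _ c hnd
    · exact hnd
  · intro u hu
    rcases (PySem.Set.mem_add seen c u).mp hu with hu | rfl
    · obtain ⟨ha, hcont, hup⟩ := hs u hu
      refine ⟨ha, ?_, ?_⟩
      · simp only [pvStep2]
        split
        · rw [PySem.Dict.contains_insert]
          simp [hcont]
        · exact hcont
      · intro huu
        simp only [pvStep2]
        split
        · rename_i hcond
          by_cases hlow : PySem.Str.lower u = PySem.Str.lower c
          · -- same key: the overwriting term must be the very same uppercase string
            rcases Bool.or_eq_true _ _ |>.mp hcond with hnc | hcu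
            · rw [← hlow] at hnc
              simp [hcont] at hnc
            · have : u = c := upper_unique ha hca huu hcu hlow
              subst this
              rw [hlow] at *
              exact PySem.Dict.get?_insert_self d _ u
            
          · rw [PySem.Dict.get?_insert_of_ne d c hlow]
            exact hup huu
        · exact hup huu
    · refine ⟨hca, ?_, ?_⟩
      · simp only [pvStep2]
        split
        · rw [PySem.Dict.contains_insert]
          simp
        · rename_i hcond
          simp only [Bool.or_eq_true, Bool.not_eq_true'] at hcond
          simp at hcond
          exact hcond.1
      · intro huu
        simp only [pvStep2]
        split
        · exact PySem.Dict.get?_insert_self d _ u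
        · rename_i hcond
          simp [huu] at hcond

def pvFilt : List String → PySem.Set String → List String
  | [], _ => []
  | t :: ts, seen =>
    let c := PySem.Str.strip t
    if pvKeep c then
      if PySem.Set.contains seen c then pvFilt ts seen
      else c :: pvFilt ts (PySem.Set.add seen c)
    else pvFilt ts seen

lemma step1_eq (seen : PySem.Set String) (acc : List String) (t : String) :
    pvStep1 (seen, acc) t =
      if pvKeep (PySem.Str.strip t) = true then
        (if PySem.Set.contains seen (PySem.Str.strip t) = true then (seen, acc)
         else (PySem.Set.add seen (PySem.Str.strip t), acc ++ [PySem.Str.strip t]))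
      else (seen, acc) := by
  simp only [pvStep1, pvKeep]
  by_cases h1 : (PySem.Str.strip t == "CUR") = true
  · rw [if_pos h1, if_neg (by
      simp only [h1, Bool.not_true, Bool.false_and]; exact Bool.false_ne_true)]
  · by_cases h2 : (decide (PySem.Str.len (PySem.Str.strip t) ≤ 1)
        || PySem.Str.strIsdigit (PySem.Str.strip t)
        || !PySem.Str.strIsalpha (PySem.Str.strip t)) = true
    · rw [if_neg h1, if_pos h2, if_neg (by
        simp only [h2, Bool.not_true, Bool.and_false]; exact Bool.false_ne_true)]
    · have halpha : PySem.Str.strIsalpha (PySem.Str.strip t) = true := by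
        have h' := Bool.eq_false_iff.mpr h2
        simp only [Bool.or_eq_false_iff] at h'
        have := h'.2
        cases hx : PySem.Str.strIsalpha (PySem.Str.strip t) <;> simp_all
      rw [if_neg h1, if_neg h2, if_pos (show (!(PySem.Str.strip t == "CUR")
            && !(decide (PySem.Str.len (PySem.Str.strip t) ≤ 1)
              || PySem.Str.strIsdigit (PySem.Str.strip t)
              || !PySem.Str.strIsalpha (PySem.Str.strip t))) = true by
          rw [Bool.eq_false_iff.mpr h1, Bool.eq_false_iff.mpr h2]; rfl),
          if_pos (alpha_all halpha)]
      by_cases h3 : PySem.Set.contains seen (PySem.Str.strip t) = true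
      · rw [if_neg (by simp only [h3, Bool.not_true]; exact Bool.false_ne_true), if_pos h3]
      · rw [if_pos (show (!(PySem.Set.contains seen (PySem.Str.strip t))) = true by
            rw [Bool.eq_false_iff.mpr h3]; rfl), if_neg h3]

lemma filt_eq (ts : List String) (seen : PySem.Set String) (acc : List String) :
    (ts.foldl pvStep1 (seen, acc)).2 = acc ++ pvFilt ts seen := by
  induction ts generalizing seen acc with
  | nil => simp [pvFilt]
  | cons t ts ih =>
    simp only [List.foldl_cons, pvFilt, step1_eq]
    by_cases hk : pvKeep (PySem.Str.strip t) = true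
    · by_cases hc : PySem.Set.contains seen (PySem.Str.strip t) = true
      · rw [if_pos hk, if_pos hk, if_pos hc, if_pos hc]
        exact ih seen acc
      · rw [if_pos hk, if_pos hk, if_neg hc, if_neg hc, ih _ _]
        simp
    · rw [if_neg hk, if_neg hk]
      exact ih seen acc

lemma lam_eq (d : PySem.Dict String String) (t : String) :
    pvAltStep d t
    = if pvKeep (PySem.Str.strip t) = true then pvStep2 d (PySem.Str.strip t) else d := by
  simp only [pvAltStep, pvKeep, pvStep2]
  by_cases h1 : (PySem.Str.strip t == "CUR") = true
  · rw [if_pos h1, if_neg (by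
      simp only [h1, Bool.not_true, Bool.false_and]; exact Bool.false_ne_true)]
  · by_cases h2 : (decide (PySem.Str.len (PySem.Str.strip t) ≤ 1)
        || PySem.Str.strIsdigit (PySem.Str.strip t)
        || !PySem.Str.strIsalpha (PySem.Str.strip t)) = true
    · rw [if_neg h1, if_pos h2, if_neg (by
        simp only [h2, Bool.not_true, Bool.and_false]; exact Bool.false_ne_true)]
    · rw [if_neg h1, if_neg h2, if_pos (show (!(PySem.Str.strip t == "CUR")
            && !(decide (PySem.Str.len (PySem.Str.strip t) ≤ 1)
              || PySem.Str.strIsdigit (PySem.Str.strip t)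
              || !PySem.Str.strIsalpha (PySem.Str.strip t))) = true by
        rw [Bool.eq_false_iff.mpr h1, Bool.eq_false_iff.mpr h2]; rfl)]

lemma main_lemma (ts : List String) (seen : PySem.Set String) (d : PySem.Dict String String)
    (hinv : pvInv seen d) :
    (pvFilt ts seen).foldl pvStep2 d =
      ts.foldl pvAltStep d := by
  induction ts generalizing seen d with
  | nil => rfl
  | cons t ts ih =>
    conv_lhs => simp only [pvFilt]
    rw [List.foldl_cons, lam_eq]
    by_cases hk : pvKeep (PySem.Str.strip t) = true
    · by_cases hc : PySem.Set.contains seen (PySem.Str.strip t) = true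
      · rw [if_pos hk, if_pos hc,
          step2_noop hinv ((PySem.Set.contains_iff seen (PySem.Str.strip t)).mp hc), if_pos hk]
        exact ih seen d hinv
      · rw [if_pos hk, if_pos hk, if_neg hc, List.foldl_cons]
        exact ih _ _ (inv_step hinv hk)
    · rw [if_neg hk, if_neg hk]
      exact ih seen d hinv

lemma inv_empty : pvInv PySem.Set.empty PySem.Dict.empty := by
  constructor
  · simp [PySem.Dict.empty, PySem.Dict.keys]
  · intro u hu
    simp [PySem.Set.empty] at hu

-- ===== VERDICT (by name: the statement is the Claim_ definition above) =====
theorem clean_terms_spec : Claim_equal_clean_terms := by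
  intro terms _
  show clean_terms terms = clean_terms_alt terms
  simp only [clean_terms, clean_terms_alt]
  rw [filt_eq terms PySem.Set.empty [], List.nil_append,
    main_lemma terms PySem.Set.empty PySem.Dict.empty inv_empty]
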